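-- pv_equiv track=rewrite | github.com/Olivierj23/floyds-sssr | main.py | is_good_cycle
-- ===== SOURCE A (Python) =====
-- import itertools
--
-- def xor(cycle_1, cycle_2):
--     return_set = set()
--
--     for edge in cycle_1:
--         if not edge in cycle_2 and not edge[::-1] in cycle_2:
--             return_set.add(edge)
--
--     for edge in cycle_2:
--         if not edge in cycle_1 and not edge[::-1] in cycle_1:
--             return_set.add(edge)
--
--     return return_set
--
-- def is_good_cycle(cycle, c_sssr):
--     cycle_1 = cycle
--     for length in range(len(c_sssr) + 1):
--         for subset in itertools.combinations(c_sssr, length):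
--             target_xor = cycle_1
--             for cycle_3 in subset:
--                 target_xor = xor(target_xor, cycle_3)
--
--             if len(target_xor) == 0:
--                 return False
--
--     return True
-- ===== SOURCE B (Python) =====
-- def is_good_cycle(cycle, c_sssr):
--     # GF(2) Gaussian elimination over normalized (undirected) edges:
--     # the cycle is good iff its edge set does not lie in the span of c_sssr.
--
--     def norm_set(c):
--         return {(a, b) if a <= b else (b, a) for a, b in c}
--
--     def reduce(v, basis):
--         # basis: list of (pivot, vector) pairs, ascending by pivot
--         for p, bv in basis:
--             if p in v:
--                 v = v ^ bv
--         return v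
--
--     basis = []
--     for c in c_sssr:
--         r = reduce(norm_set(c), basis)
--         if r:
--             p = min(r)
--             i = 0
--             while i < len(basis) and basis[i][0] < p:
--                 i += 1
--             basis.insert(i, (p, r))
--
--     return bool(reduce(norm_set(cycle), basis))
-- ===== Notes on version B (the rewrite author's own statement) =====
-- stated objective: faster
-- what changed: Replaced the exponential enumeration of all subsets of c_sssr (XORing each combination) by GF(2) Gaussian elimination on normalized undirected edge sets: build a pivoted basis in one pass and reduce the cycle against it; the cycle is good iff the residual is nonzero.
import Mathlib
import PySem

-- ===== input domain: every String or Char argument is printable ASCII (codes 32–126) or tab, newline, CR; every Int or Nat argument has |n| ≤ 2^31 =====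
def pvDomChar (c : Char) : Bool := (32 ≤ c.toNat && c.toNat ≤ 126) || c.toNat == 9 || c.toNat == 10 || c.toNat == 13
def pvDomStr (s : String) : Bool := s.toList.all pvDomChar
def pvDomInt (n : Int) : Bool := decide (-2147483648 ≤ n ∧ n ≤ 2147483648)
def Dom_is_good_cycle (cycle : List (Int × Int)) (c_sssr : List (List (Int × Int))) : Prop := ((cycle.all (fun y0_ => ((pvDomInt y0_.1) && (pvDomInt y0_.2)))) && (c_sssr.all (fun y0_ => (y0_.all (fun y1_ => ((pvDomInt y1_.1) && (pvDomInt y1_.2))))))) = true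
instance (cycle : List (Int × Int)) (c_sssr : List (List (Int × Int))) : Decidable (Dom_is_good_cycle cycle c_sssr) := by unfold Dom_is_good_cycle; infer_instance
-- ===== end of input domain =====

-- B replaces A's exponential enumeration of all subsets of c_sssr by GF(2) Gaussian
-- elimination on the normalized (undirected) edge sets; same return value, faster.


-- ===== PORT A =====
-- xor(cycle_1, cycle_2): set of edges in exactly one of the two (either orientation)
def pyXor (c1 c2 : List (Int × Int)) : PySem.Set (Int × Int) :=
  let s := c1.foldl
    (fun s e => if e ∈ c2 ∨ (e.2, e.1) ∈ c2 then s else PySem.Set.add s e)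
    (PySem.Set.empty)
  c2.foldl
    (fun s e => if e ∈ c1 ∨ (e.2, e.1) ∈ c1 then s else PySem.Set.add s e) s

-- itertools.combinations(l, k): all k-element sublists of l, in itertools' order
def combos {α : Type} : List α → Nat → List (List α)
  | _, 0 => [[]]
  | [], _ + 1 => []
  | x :: xs, k + 1 => (combos xs k).map (fun t => x :: t) ++ combos xs (k + 1)

def is_good_cycle (cycle : List (Int × Int)) (c_sssr : List (List (Int × Int))) : Bool :=
  ((List.range (c_sssr.length + 1)).flatMap (fun k => combos c_sssr k)).all
    (fun subset => !(subset.foldl (fun acc c3 => pyXor acc c3) cycle).isEmpty)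

-- ===== PORT B =====
-- Python tuple '<' on pairs of ints (lexicographic); ported by hand, exact on int pairs
def pyLt (a b : Int × Int) : Bool := a.1 < b.1 || (a.1 == b.1 && a.2 < b.2)

-- norm_set(c): the set of normalized edges of c
def normSet (c : List (Int × Int)) : PySem.Set (Int × Int) :=
  c.foldl (fun s e => PySem.Set.add s (if e.1 ≤ e.2 then e else (e.2, e.1))) PySem.Set.empty

-- reduce(v, basis): xor v with each basis vector whose pivot lies in v (ascending pivots)
def reduceB (v : PySem.Set (Int × Int))
    (basis : List ((Int × Int) × PySem.Set (Int × Int))) : PySem.Set (Int × Int) :=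
  basis.foldl (fun v pb => if pb.1 ∈ v then PySem.Set.symmDiff v pb.2 else v) v

-- min(r) over a nonempty set of int pairs (Python's tuple min, order-independent)
def pyMinE (e : Int × Int) (es : List (Int × Int)) : Int × Int :=
  es.foldl (fun m x => if pyLt x m then x else m) e

-- the while-loop + list.insert: insert (p, r) before the first entry with pivot ≥ p
def insertSorted (p : Int × Int) (r : PySem.Set (Int × Int)) :
    List ((Int × Int) × PySem.Set (Int × Int)) → List ((Int × Int) × PySem.Set (Int × Int))
  | [] => [(p, r)]
  | qb :: rest => if pyLt qb.1 p then qb :: insertSorted p r rest else (p, r) :: qb :: rest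

def is_good_cycle_alt (cycle : List (Int × Int)) (c_sssr : List (List (Int × Int))) : Bool :=
  let basis := c_sssr.foldl (fun basis c =>
    match reduceB (normSet c) basis with
    | [] => basis
    | e :: es => insertSorted (pyMinE e es) (e :: es) basis) []
  !(reduceB (normSet cycle) basis).isEmpty

-- ===== PRECONDITION & SPEC =====
def Spec_is_good_cycle (cycle : List (Int × Int)) (c_sssr : List (List (Int × Int))) (out : Bool) : Prop := out = is_good_cycle_alt cycle c_sssr
instance (cycle : List (Int × Int)) (c_sssr : List (List (Int × Int))) (out : Bool) : Decidable (Spec_is_good_cycle cycle c_sssr out) := by unfold Spec_is_good_cycle; infer_instance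

-- ===== CLAIM (what is proved, stated in full; the proofs are below) =====
def Claim_equal_is_good_cycle : Prop := ∀ (cycle : List (Int × Int)) (c_sssr : List (List (Int × Int))), Dom_is_good_cycle cycle c_sssr → Spec_is_good_cycle cycle c_sssr (is_good_cycle cycle c_sssr)

-- ===== LEMMAS AND PROOFS =====

-- normalized edge, and the edge-set semantics of a cycle
def normE (e : Int × Int) : Int × Int := if e.1 ≤ e.2 then e else (e.2, e.1)

def NF (l : List (Int × Int)) : Finset (Int × Int) := (l.map normE).toFinset

-- GF(2) fold of a list of vectors
def FX (t : List (Finset (Int × Int))) : Finset (Int × Int) :=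
  t.foldr (fun a v => symmDiff a v) ∅

-- "v is the XOR of some sublist of L" — the GF(2) span, phrased exactly as A enumerates it
def SpanSub (L : List (Finset (Int × Int))) (v : Finset (Int × Int)) : Prop :=
  ∃ t, List.Sublist t L ∧ FX t = v

def vals (basis : List ((Int × Int) × PySem.Set (Int × Int))) : List (Finset (Int × Int)) :=
  basis.map (fun pb => pb.2.toFinset)

def GoodB (basis : List ((Int × Int) × PySem.Set (Int × Int))) : Prop :=
  List.Pairwise (fun pb qb => pyLt pb.1 qb.1 = true) basis ∧
    ∀ pb ∈ basis, pb.1 ∈ pb.2 ∧ ∀ x ∈ pb.2, pyLt x pb.1 = false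

-- ---- pyLt toolbox ----
lemma pyLt_iff (a b : Int × Int) : pyLt a b = true ↔ a.1 < b.1 ∨ (a.1 = b.1 ∧ a.2 < b.2) := by
  simp [pyLt]

lemma pyLt_irrefl (a : Int × Int) : pyLt a a = false := by
  simp [pyLt]

lemma pyLt_asymm {a b : Int × Int} (h : pyLt a b = true) : pyLt b a = false := by
  rw [pyLt_iff] at h
  rw [← Bool.not_eq_true, pyLt_iff]
  omega

lemma pyLt_of_not_of_ne {a b : Int × Int} (h : pyLt a b = false) (hne : b ≠ a) :
    pyLt b a = true := by
  obtain ⟨a1, a2⟩ := a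
  obtain ⟨b1, b2⟩ := b
  simp only [pyLt, Prod.mk.injEq, Bool.or_eq_false_iff, Bool.or_eq_true,
    Bool.and_eq_false_iff, Bool.and_eq_true, beq_iff_eq, decide_eq_false_iff_not,
    decide_eq_true_eq, not_lt, beq_eq_false_iff_ne, ne_eq] at *
  have : ¬(b1 = a1 ∧ b2 = a2) := by simpa using hne
  omega

-- ---- normE toolbox ----
lemma normE_rev (e : Int × Int) : normE (e.2, e.1) = normE e := by
  obtain ⟨a, b⟩ := e
  simp only [normE]
  split_ifs <;> first | rfl | (exact Prod.ext (by omega) (by omega))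

lemma normE_eq_iff (d d' : Int × Int) : normE d = normE d' ↔ d' = d ∨ d' = (d.2, d.1) := by
  obtain ⟨a, b⟩ := d
  obtain ⟨c, e⟩ := d'
  simp only [normE, Prod.mk.injEq]
  constructor
  · intro h
    split_ifs at h <;> simp only [Prod.mk.injEq] at h <;> omega
  · intro h
    split_ifs <;> simp only [Prod.mk.injEq] <;> omega

lemma mem_NF {l : List (Int × Int)} {x : Int × Int} : x ∈ NF l ↔ ∃ d ∈ l, normE d = x := by
  simp [NF]

lemma NF_eq_empty {l : List (Int × Int)} : NF l = ∅ ↔ l = [] := by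
  rw [NF, List.toFinset_eq_empty_iff, List.map_eq_nil_iff]

-- ---- port A semantics ----
lemma mem_foldl_addIf {p : Int × Int → Prop} [DecidablePred p] (l : List (Int × Int))
    (s : List (Int × Int)) (x : Int × Int) :
    x ∈ l.foldl (fun s e => if p e then s else PySem.Set.add s e) s ↔
      x ∈ s ∨ (x ∈ l ∧ ¬ p x) := by
  induction l generalizing s with
  | nil => simp
  | cons e l ih =>
    simp only [List.foldl_cons, List.mem_cons, ih]
    by_cases hp : p e
    · simp only [if_pos hp]
      constructor
      · rintro (h | h)
        · exact Or.inl h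
        · exact Or.inr ⟨Or.inr h.1, h.2⟩
      · rintro (h | ⟨(rfl | h), hx⟩)
        · exact Or.inl h
        · exact absurd hp hx
        · exact Or.inr ⟨h, hx⟩
    · simp only [if_neg hp, PySem.Set.mem_add]
      constructor
      · rintro ((h | rfl) | h)
        · exact Or.inl h
        · exact Or.inr ⟨Or.inl rfl, hp⟩
        · exact Or.inr ⟨Or.inr h.1, h.2⟩
      · rintro (h | ⟨(rfl | h), hx⟩)
        · exact Or.inl (Or.inl h)
        · exact Or.inl (Or.inr rfl)
        · exact Or.inr ⟨h, hx⟩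

lemma mem_pyXor {c1 c2 : List (Int × Int)} {x : Int × Int} :
    x ∈ pyXor c1 c2 ↔
      (x ∈ c1 ∧ ¬ (x ∈ c2 ∨ (x.2, x.1) ∈ c2)) ∨ (x ∈ c2 ∧ ¬ (x ∈ c1 ∨ (x.2, x.1) ∈ c1)) := by
  unfold pyXor
  rw [mem_foldl_addIf (p := fun e => e ∈ c1 ∨ (e.2, e.1) ∈ c1),
    mem_foldl_addIf (p := fun e => e ∈ c2 ∨ (e.2, e.1) ∈ c2)]
  simp [PySem.Set.empty, or_comm]

lemma NF_pyXor (c1 c2 : List (Int × Int)) : NF (pyXor c1 c2) = symmDiff (NF c1) (NF c2) := by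
  ext x
  rw [Finset.mem_symmDiff, mem_NF]
  constructor
  · rintro ⟨d, hd, rfl⟩
    rw [mem_pyXor] at hd
    push Not at hd
    rcases hd with ⟨h1, h2, h3⟩ | ⟨h2, h1, h3⟩
    · left
      refine ⟨mem_NF.mpr ⟨d, h1, rfl⟩, ?_⟩
      intro hc
      obtain ⟨d', hd', he⟩ := mem_NF.mp hc
      rcases (normE_eq_iff d d').mp he.symm with rfl | rfl
      · exact h2 hd'
      · exact h3 hd'
    · right
      refine ⟨mem_NF.mpr ⟨d, h2, rfl⟩, ?_⟩
      intro hc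
      obtain ⟨d', hd', he⟩ := mem_NF.mp hc
      rcases (normE_eq_iff d d').mp he.symm with rfl | rfl
      · exact h1 hd'
      · exact h3 hd'
  · rintro (⟨h1, h2⟩ | ⟨h1, h2⟩) <;> obtain ⟨d, hd, rfl⟩ := mem_NF.mp h1
    · refine ⟨d, ?_, rfl⟩
      rw [mem_pyXor]
      left
      refine ⟨hd, ?_⟩
      rintro (hc | hc)
      · exact h2 (mem_NF.mpr ⟨d, hc, rfl⟩)
      · exact h2 (mem_NF.mpr ⟨(d.2, d.1), hc, normE_rev d⟩)
    · refine ⟨d, ?_, rfl⟩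
      rw [mem_pyXor]
      right
      refine ⟨hd, ?_⟩
      rintro (hc | hc)
      · exact h2 (mem_NF.mpr ⟨d, hc, rfl⟩)
      · exact h2 (mem_NF.mpr ⟨(d.2, d.1), hc, normE_rev d⟩)

lemma NF_foldl_pyXor (subset : List (List (Int × Int))) (cycle : List (Int × Int)) :
    NF (subset.foldl (fun acc c3 => pyXor acc c3) cycle) =
      symmDiff (NF cycle) (FX (subset.map NF)) := by
  induction subset generalizing cycle with
  | nil => simp only [List.foldl_nil, List.map_nil, FX, List.foldr_nil]; exact (symmDiff_eq_left.mpr rfl).symm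
  | cons c ss ih =>
    simp only [List.foldl_cons, List.map_cons]
    rw [ih, NF_pyXor]
    show symmDiff (symmDiff (NF cycle) (NF c)) (FX (ss.map NF)) =
      symmDiff (NF cycle) (FX (NF c :: ss.map NF))
    rw [symmDiff_assoc]
    rfl

lemma mem_combos {α : Type} (l : List α) (k : Nat) (t : List α) :
    t ∈ combos l k ↔ List.Sublist t l ∧ t.length = k := by
  induction l generalizing k t with
  | nil =>
    cases k with
    | zero => simp [combos, List.sublist_nil, List.length_eq_zero_iff]
    | succ k =>
      simp only [combos, List.not_mem_nil, false_iff, not_and]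
      intro hs
      rw [List.sublist_nil.mp hs]
      simp
  | cons x xs ih =>
    cases k with
    | zero =>
      simp only [combos, List.mem_singleton]
      constructor
      · rintro rfl; simp
      · rintro ⟨_, hl⟩; exact List.length_eq_zero_iff.mp hl
    | succ k =>
      simp only [combos, List.mem_append, List.mem_map, ih]
      rw [List.sublist_cons_iff]
      constructor
      · rintro (⟨t', ⟨hs, hl⟩, rfl⟩ | ⟨hs, hl⟩)
        · exact ⟨Or.inr ⟨t', rfl, hs⟩, by simp [hl]⟩
        · exact ⟨Or.inl hs, hl⟩
      · rintro ⟨hs | ⟨r, rfl, hr⟩, hl⟩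
        · exact Or.inr ⟨hs, hl⟩
        · exact Or.inl ⟨r, ⟨hr, by simpa using hl⟩, rfl⟩

lemma A_char (cycle : List (Int × Int)) (c_sssr : List (List (Int × Int))) :
    is_good_cycle cycle c_sssr = true ↔ ¬ SpanSub (c_sssr.map NF) (NF cycle) := by
  unfold is_good_cycle
  rw [List.all_eq_true]
  constructor
  · intro h hspan
    obtain ⟨t, hts, hfx⟩ := hspan
    obtain ⟨subset, hsub, rfl⟩ := List.sublist_map_iff.mp hts
    have hmem : subset ∈ (List.range (c_sssr.length + 1)).flatMap (fun k => combos c_sssr k) := by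
      rw [List.mem_flatMap]
      exact ⟨subset.length, List.mem_range.mpr (Nat.lt_succ_of_le hsub.length_le),
        (mem_combos _ _ _).mpr ⟨hsub, rfl⟩⟩
    have := h subset hmem
    simp only [Bool.not_eq_eq_eq_not, Bool.not_true, List.isEmpty_eq_false_iff] at this
    apply this
    have hnf : NF (subset.foldl (fun acc c3 => pyXor acc c3) cycle) = ∅ := by
      rw [NF_foldl_pyXor, hfx, symmDiff_self]
      rfl
    exact NF_eq_empty.mp hnf
  · intro h subset hmem
    simp only [Bool.not_eq_eq_eq_not, Bool.not_true, List.isEmpty_eq_false_iff]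
    intro hemp
    apply h
    rw [List.mem_flatMap] at hmem
    obtain ⟨k, _, hk⟩ := hmem
    obtain ⟨hsub, _⟩ := (mem_combos _ _ _).mp hk
    refine ⟨subset.map NF, hsub.map NF, ?_⟩
    have := NF_foldl_pyXor subset cycle
    rw [hemp] at this
    have h0 : (∅ : Finset (Int × Int)) = symmDiff (NF cycle) (FX (subset.map NF)) := by
      simpa [NF] using this
    have := Finset.symmDiff_eq_empty.mp h0.symm
    exact this.symm

-- ---- SpanSub toolbox ----
lemma spanSub_nil {v : Finset (Int × Int)} : SpanSub [] v ↔ v = ∅ := by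
  constructor
  · rintro ⟨t, hts, rfl⟩
    rw [List.sublist_nil.mp hts]
    rfl
  · rintro rfl
    exact ⟨[], List.Sublist.refl _, rfl⟩

lemma spanSub_cons {a : Finset (Int × Int)} {L : List (Finset (Int × Int))}
    {v : Finset (Int × Int)} :
    SpanSub (a :: L) v ↔ SpanSub L v ∨ SpanSub L (symmDiff a v) := by
  constructor
  · rintro ⟨t, hts, rfl⟩
    rcases List.sublist_cons_iff.mp hts with h | ⟨r, rfl, hr⟩
    · exact Or.inl ⟨t, h, rfl⟩
    · right
      refine ⟨r, hr, ?_⟩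
      show FX r = symmDiff a (FX (a :: r))
      show FX r = symmDiff a (symmDiff a (FX r))
      rw [symmDiff_symmDiff_cancel_left]
  · rintro (⟨t, hts, rfl⟩ | ⟨t, hts, hfx⟩)
    · exact ⟨t, hts.cons a, rfl⟩
    · refine ⟨a :: t, hts.cons₂ a, ?_⟩
      show symmDiff a (FX t) = v
      rw [hfx, symmDiff_symmDiff_cancel_left]

lemma spanSub_empty (L : List (Finset (Int × Int))) : SpanSub L ∅ :=
  ⟨[], List.nil_sublist L, rfl⟩

lemma spanSub_snoc {a : Finset (Int × Int)} {L : List (Finset (Int × Int))}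
    {v : Finset (Int × Int)} :
    SpanSub (L ++ [a]) v ↔ SpanSub L v ∨ SpanSub L (symmDiff a v) := by
  induction L generalizing v with
  | nil =>
    rw [List.nil_append, spanSub_cons]
  | cons b L ih =>
    rw [List.cons_append, spanSub_cons, spanSub_cons, ih, ih, spanSub_cons (a := b) (L := L),
      symmDiff_left_comm a b v]
    tauto

lemma spanSub_symmDiff {L : List (Finset (Int × Int))} {a v : Finset (Int × Int)}
    (ha : SpanSub L a) (hv : SpanSub L v) : SpanSub L (symmDiff a v) := by
  induction L generalizing a v with
  | nil =>
    rw [spanSub_nil] at *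
    rw [ha, hv]
    exact symmDiff_self ∅
  | cons b L ih =>
    rw [spanSub_cons] at *
    rcases ha with ha | ha <;> rcases hv with hv | hv
    · exact Or.inl (ih ha hv)
    · right
      have := ih ha hv
      rwa [symmDiff_left_comm a b v] at this
    · right
      have := ih ha hv
      rwa [symmDiff_assoc] at this
    · left
      have := ih ha hv
      have he : symmDiff (symmDiff b a) (symmDiff b v) = symmDiff a v := by
        rw [symmDiff_assoc, symmDiff_left_comm a b v, symmDiff_symmDiff_cancel_left]
      rwa [he] at this
  

lemma spanSub_perm {L L' : List (Finset (Int × Int))} (h : L.Perm L')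
    {v : Finset (Int × Int)} : SpanSub L v ↔ SpanSub L' v := by
  induction h generalizing v with
  | nil => rfl
  | cons a _ ih => rw [spanSub_cons, spanSub_cons, ih, ih]
  | swap a b L =>
    simp only [spanSub_cons]
    rw [symmDiff_left_comm a b v]
    tauto
  | trans _ _ ih1 ih2 => rw [ih1, ih2]

lemma spanSub_mem_exists {L : List (Finset (Int × Int))} {w : Finset (Int × Int)}
    (h : SpanSub L w) {e : Int × Int} (he : e ∈ w) : ∃ u ∈ L, e ∈ u := by
  obtain ⟨t, hts, rfl⟩ := h
  have : ∀ (t : List (Finset (Int × Int))), e ∈ FX t → ∃ u ∈ t, e ∈ u := by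
    intro t
    induction t with
    | nil => simp [FX]
    | cons a t ih =>
      intro hm
      rcases (Finset.mem_symmDiff.mp hm) with ⟨h1, _⟩ | ⟨h1, _⟩
      · exact ⟨a, List.mem_cons_self, h1⟩
      · obtain ⟨u, hu, heu⟩ := ih h1
        exact ⟨u, List.mem_cons_of_mem a hu, heu⟩
  obtain ⟨u, hu, heu⟩ := this t he
  exact ⟨u, hts.subset hu, heu⟩

-- ---- port B semantics ----
lemma toFinset_normSet (c : List (Int × Int)) : (normSet c).toFinset = NF c := by
  ext x
  rw [List.mem_toFinset, mem_NF]
  unfold normSet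
  rw [PySem.Set.mem_foldl_add]
  simp only [PySem.Set.empty, List.not_mem_nil, false_or]
  constructor
  · rintro ⟨d, hd, rfl⟩
    exact ⟨d, hd, rfl⟩
  · rintro ⟨d, hd, rfl⟩
    exact ⟨d, hd, rfl⟩

lemma toFinset_symmDiff (v bv : List (Int × Int)) :
    (PySem.Set.symmDiff v bv).toFinset = symmDiff v.toFinset bv.toFinset := by
  ext x
  rw [List.mem_toFinset, PySem.Set.mem_symmDiff, Finset.mem_symmDiff]
  simp [List.mem_toFinset]

lemma pyMinE_spec (e : Int × Int) (es : List (Int × Int)) :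
    pyMinE e es ∈ e :: es ∧ ∀ x ∈ e :: es, pyLt x (pyMinE e es) = false := by
  induction es generalizing e with
  | nil =>
    refine ⟨List.mem_singleton.mpr rfl, ?_⟩
    intro x hx
    rw [List.mem_singleton.mp hx]
    exact pyLt_irrefl _
  | cons y ys ih =>
    have hstep : pyMinE e (y :: ys) = pyMinE (if pyLt y e then y else e) ys := rfl
    obtain ⟨ihm, ihl⟩ := ih (if pyLt y e then y else e)
    set m := pyMinE (if pyLt y e then y else e) ys with hm
    have hmem : m ∈ e :: y :: ys := by
      rcases List.mem_cons.mp ihm with h | h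
      · split_ifs at h <;> simp [h]
      · simp [h]
    refine ⟨by rw [hstep]; exact hmem, ?_⟩
    intro x hx
    rw [hstep]
    have hmin' : pyLt (if pyLt y e then y else e) m = false :=
      ihl _ List.mem_cons_self
    have key : ∀ z : Int × Int, pyLt z (if pyLt y e then y else e) = false →
        pyLt z m = false := by
      intro z hz
      by_cases hzm : pyLt z m = true
      · -- z < m but ¬ z < w (w the ite); so w ≤ z; also ¬ w < m; contradiction by omega
        exfalso
        set w := if pyLt y e then y else e with hw
        rw [pyLt_iff] at hzm
        have h1 : pyLt z w = false := hz
        have h2 : pyLt w m = false := hmin'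
        rw [← Bool.not_eq_true, pyLt_iff] at h1 h2
        obtain ⟨z1, z2⟩ := z; obtain ⟨w1, w2⟩ := w; obtain ⟨m1, m2⟩ := m
        simp only at *
        omega
      · exact Bool.not_eq_true _ ▸ (by simpa using hzm)
    rcases List.mem_cons.mp hx with rfl | hx
    · -- x = e
      apply key
      split_ifs with h
      · exact pyLt_asymm h
      · exact pyLt_irrefl _
    rcases List.mem_cons.mp hx with rfl | hx
    · -- x = y
      apply key
      split_ifs with h
      · exact pyLt_irrefl _
      · simpa using h
    · exact ihl x (List.mem_cons_of_mem _ hx)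

lemma reduceB_span (basis : List ((Int × Int) × PySem.Set (Int × Int)))
    (v : PySem.Set (Int × Int)) :
    ∃ x, SpanSub (vals basis) x ∧
      (reduceB v basis).toFinset = symmDiff v.toFinset x := by
  induction basis generalizing v with
  | nil =>
    exact ⟨∅, spanSub_empty _, (symmDiff_eq_left.mpr rfl).symm⟩
  | cons pb rest ih =>
    show ∃ x, _ ∧ (reduceB (if pb.1 ∈ v then PySem.Set.symmDiff v pb.2 else v) rest).toFinset = _
    by_cases hp : pb.1 ∈ v
    · rw [if_pos hp]
      obtain ⟨x, hx, hfx⟩ := ih (PySem.Set.symmDiff v pb.2)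
      refine ⟨symmDiff pb.2.toFinset x, ?_, ?_⟩
      · rw [show vals (pb :: rest) = pb.2.toFinset :: vals rest from rfl, spanSub_cons]
        right
        rwa [symmDiff_symmDiff_cancel_left]
      · rw [hfx, toFinset_symmDiff, symmDiff_assoc]
    · rw [if_neg hp]
      obtain ⟨x, hx, hfx⟩ := ih v
      refine ⟨x, ?_, hfx⟩
      rw [show vals (pb :: rest) = pb.2.toFinset :: vals rest from rfl, spanSub_cons]
      exact Or.inl hx

lemma reduceB_not_mem {e : Int × Int} (basis : List ((Int × Int) × PySem.Set (Int × Int)))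
    (v : PySem.Set (Int × Int)) (hv : e ∉ v) (hb : ∀ pb ∈ basis, e ∉ pb.2) :
    e ∉ reduceB v basis := by
  induction basis generalizing v with
  | nil => exact hv
  | cons pb rest ih =>
    show e ∉ reduceB (if pb.1 ∈ v then PySem.Set.symmDiff v pb.2 else v) rest
    apply ih
    · split_ifs
      · rw [PySem.Set.mem_symmDiff]
        have hh : e ∉ pb.2 := hb pb List.mem_cons_self
        tauto
      · exact hv
    · exact fun qb hqb => hb qb (List.mem_cons_of_mem _ hqb)

lemma reduceB_no_pivot (basis : List ((Int × Int) × PySem.Set (Int × Int)))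
    (hg : GoodB basis) (v : PySem.Set (Int × Int)) :
    ∀ pb ∈ basis, pb.1 ∉ reduceB v basis := by
  induction basis generalizing v with
  | nil => simp
  | cons pb rest ih =>
    obtain ⟨hpw, hmin⟩ := hg
    have hgrest : GoodB rest := ⟨hpw.of_cons, fun qb hqb => hmin qb (List.mem_cons_of_mem _ hqb)⟩
    intro qb hqb
    show qb.1 ∉ reduceB (if pb.1 ∈ v then PySem.Set.symmDiff v pb.2 else v) rest
    rcases List.mem_cons.mp hqb with rfl | hqb'
    · -- the head pivot: removed (or absent) at this step, never reintroduced
      apply reduceB_not_mem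
      · split_ifs with h
        · rw [PySem.Set.mem_symmDiff]
          have : qb.1 ∈ qb.2 := (hmin qb List.mem_cons_self).1
          tauto
        · exact h
      · -- the head pivot is strictly below every element of every later vector
        intro rb hrb hmem
        have h1 : pyLt qb.1 rb.1 = true := (List.pairwise_cons.mp hpw).1 rb hrb
        have h2 : pyLt qb.1 rb.1 = false :=
          (hmin rb (List.mem_cons_of_mem _ hrb)).2 qb.1 hmem
        rw [h1] at h2
        exact absurd h2 (by decide)
    · exact ih hgrest _ qb hqb'

lemma span_no_pivot_eq_empty (basis : List ((Int × Int) × PySem.Set (Int × Int)))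
    (hg : GoodB basis) {r : Finset (Int × Int)} (hs : SpanSub (vals basis) r)
    (hp : ∀ pb ∈ basis, pb.1 ∉ r) : r = ∅ := by
  induction basis generalizing r with
  | nil => exact spanSub_nil.mp hs
  | cons pb rest ih =>
    obtain ⟨hpw, hmin⟩ := hg
    have hgrest : GoodB rest := ⟨hpw.of_cons, fun qb hqb => hmin qb (List.mem_cons_of_mem _ hqb)⟩
    rw [show vals (pb :: rest) = pb.2.toFinset :: vals rest from rfl, spanSub_cons] at hs
    rcases hs with hs | hs
    · exact ih hgrest hs (fun qb hqb => hp qb (List.mem_cons_of_mem _ hqb))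
    · -- impossible: pb.1 ∈ symmDiff pb.2 r, yet every vector of rest lies strictly above pb.1
      exfalso
      have hmem : pb.1 ∈ symmDiff pb.2.toFinset r := by
        rw [Finset.mem_symmDiff]
        exact Or.inl ⟨List.mem_toFinset.mpr (hmin pb List.mem_cons_self).1,
          hp pb List.mem_cons_self⟩
      obtain ⟨u, hu, heu⟩ := spanSub_mem_exists hs hmem
      obtain ⟨rb, hrb, rfl⟩ := List.mem_map.mp hu
      have h1 : pyLt pb.1 rb.1 = true := (List.pairwise_cons.mp hpw).1 rb hrb
      have h2 : pyLt pb.1 rb.1 = false :=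
        (hmin rb (List.mem_cons_of_mem _ hrb)).2 pb.1 (List.mem_toFinset.mp heu)
      rw [h1] at h2
      exact absurd h2 (by decide)

lemma mem_insertSorted {p : Int × Int} {r : PySem.Set (Int × Int)}
    {basis : List ((Int × Int) × PySem.Set (Int × Int))}
    {qb : (Int × Int) × PySem.Set (Int × Int)} :
    qb ∈ insertSorted p r basis ↔ qb = (p, r) ∨ qb ∈ basis := by
  induction basis with
  | nil => simp [insertSorted]
  | cons rb rest ih =>
    show qb ∈ (if pyLt rb.1 p then rb :: insertSorted p r rest else (p, r) :: rb :: rest) ↔ _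
    split_ifs
    · rw [List.mem_cons, ih, List.mem_cons]
      tauto
    · rw [List.mem_cons]

lemma vals_insertSorted_perm (p : Int × Int) (r : PySem.Set (Int × Int))
    (basis : List ((Int × Int) × PySem.Set (Int × Int))) :
    (vals (insertSorted p r basis)).Perm (r.toFinset :: vals basis) := by
  induction basis with
  | nil => exact List.Perm.refl _
  | cons rb rest ih =>
    show vals (if pyLt rb.1 p then rb :: insertSorted p r rest else (p, r) :: rb :: rest) |>.Perm _
    split_ifs
    · show (rb.2.toFinset :: vals (insertSorted p r rest)).Perm
        (r.toFinset :: rb.2.toFinset :: vals rest)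
      exact ((ih).cons rb.2.toFinset).trans (List.Perm.swap _ _ _)
    · exact List.Perm.refl _

lemma goodB_insertSorted {p : Int × Int} {r : PySem.Set (Int × Int)}
    {basis : List ((Int × Int) × PySem.Set (Int × Int))} (hg : GoodB basis)
    (hp : p ∈ r ∧ ∀ x ∈ r, pyLt x p = false) (hfresh : ∀ pb ∈ basis, pb.1 ≠ p) :
    GoodB (insertSorted p r basis) := by
  constructor
  · -- pivots stay strictly ascending
    have aux : ∀ bs : List ((Int × Int) × PySem.Set (Int × Int)),
        List.Pairwise (fun pb qb => pyLt pb.1 qb.1 = true) bs → (∀ pb ∈ bs, pb.1 ≠ p) →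
        List.Pairwise (fun pb qb => pyLt pb.1 qb.1 = true) (insertSorted p r bs) := by
      intro bs
      induction bs with
      | nil => simp [insertSorted]
      | cons rb rest ih =>
        intro hpw hfr
        rw [List.pairwise_cons] at hpw
        show List.Pairwise _
          (if pyLt rb.1 p then rb :: insertSorted p r rest else (p, r) :: rb :: rest)
        split_ifs with h
        · rw [List.pairwise_cons]
          refine ⟨?_, ih hpw.2 (fun qb hqb => hfr qb (List.mem_cons_of_mem _ hqb))⟩
          intro qb hqb
          rcases mem_insertSorted.mp hqb with rfl | hqb'
          · exact h
          · exact hpw.1 qb hqb'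
        · rw [List.pairwise_cons]
          refine ⟨?_, List.pairwise_cons.mpr hpw⟩
          intro qb hqb
          rcases List.mem_cons.mp hqb with rfl | hqb'
          · exact pyLt_of_not_of_ne (by simpa using h)
              (fun hc => hfr qb List.mem_cons_self hc.symm)
          · -- p < rb.1 ≤ qb.1 for later entries
            show pyLt p qb.1 = true
            have h1 : pyLt p rb.1 = true :=
              pyLt_of_not_of_ne (by simpa using h) (fun hc => hfr rb List.mem_cons_self hc.symm)
            have h2 : pyLt rb.1 qb.1 = true := hpw.1 qb hqb'
            rw [pyLt_iff] at *
            omega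
    exact aux basis hg.1 hfresh
  · intro qb hqb
    rcases mem_insertSorted.mp hqb with rfl | hqb'
    · exact hp
    · exact hg.2 qb hqb'

-- ---- the elimination loop invariant ----
def stepB (basis : List ((Int × Int) × PySem.Set (Int × Int))) (c : List (Int × Int)) :
    List ((Int × Int) × PySem.Set (Int × Int)) :=
  match reduceB (normSet c) basis with
  | [] => basis
  | e :: es => insertSorted (pyMinE e es) (e :: es) basis

def LoopInv (cs : List (List (Int × Int))) (basis : List ((Int × Int) × PySem.Set (Int × Int))) :
    Prop :=
  GoodB basis ∧ ∀ w, SpanSub (vals basis) w ↔ SpanSub (cs.map NF) w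

lemma inv_step {pre : List (List (Int × Int))}
    {basis : List ((Int × Int) × PySem.Set (Int × Int))} (h : LoopInv pre basis)
    (c : List (Int × Int)) : LoopInv (pre ++ [c]) (stepB basis c) := by
  obtain ⟨hg, hspan⟩ := h
  have hmapsnoc : (pre ++ [c]).map NF = pre.map NF ++ [NF c] := by simp
  obtain ⟨x, hx, hfx⟩ := reduceB_span basis (normSet c)
  rw [toFinset_normSet] at hfx
  unfold stepB
  cases hr : reduceB (normSet c) basis with
  | nil =>
    have h0 : (∅ : Finset (Int × Int)) = symmDiff (NF c) x := by
      rw [← hfx, hr]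
      rfl
    have hxc : x = NF c := (Finset.symmDiff_eq_empty.mp h0.symm).symm
    have hc : SpanSub (vals basis) (NF c) := hxc ▸ hx
    refine ⟨hg, fun w => ?_⟩
    rw [hmapsnoc, spanSub_snoc, ← hspan w, ← hspan (symmDiff (NF c) w)]
    constructor
    · exact Or.inl
    · rintro (h | h)
      · exact h
      · have := spanSub_symmDiff hc h
        rwa [symmDiff_symmDiff_cancel_left] at this
  | cons e es =>
    obtain ⟨hpmem, hpmin⟩ := pyMinE_spec e es
    have hfresh : ∀ pb ∈ basis, pb.1 ≠ pyMinE e es := by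
      intro pb hpb hc2
      have := reduceB_no_pivot basis hg (normSet c) pb hpb
      rw [hr, hc2] at this
      exact this hpmem
    refine ⟨goodB_insertSorted hg ⟨hpmem, hpmin⟩ hfresh, fun w => ?_⟩
    rw [spanSub_perm (vals_insertSorted_perm (pyMinE e es) (e :: es) basis),
      spanSub_cons, hmapsnoc, spanSub_snoc, ← hspan w, ← hspan (symmDiff (NF c) w)]
    have hrt : ((e :: es) : List (Int × Int)).toFinset = symmDiff (NF c) x := by
      rw [← hfx, hr]
    rw [hrt]
    have he1 : symmDiff x (symmDiff (symmDiff (NF c) x) w) = symmDiff (NF c) w := by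
      rw [symmDiff_assoc (NF c) x w, symmDiff_left_comm x (NF c) (symmDiff x w),
        symmDiff_symmDiff_cancel_left]
    have he2 : symmDiff x (symmDiff (NF c) w) = symmDiff (symmDiff (NF c) x) w := by
      rw [symmDiff_assoc (NF c) x w, symmDiff_left_comm x (NF c) w]
    constructor
    · rintro (h | h)
      · exact Or.inl h
      · right
        have := spanSub_symmDiff hx h
        rwa [he1] at this
    · rintro (h | h)
      · exact Or.inl h
      · right
        have := spanSub_symmDiff hx h
        rwa [he2] at this

lemma inv_foldl (cs : List (List (Int × Int))) :
    ∀ (pre : List (List (Int × Int))) (basis : List ((Int × Int) × PySem.Set (Int × Int))),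
      LoopInv pre basis → LoopInv (pre ++ cs) (cs.foldl stepB basis) := by
  induction cs with
  | nil =>
    intro pre basis h
    simpa using h
  | cons c cs ih =>
    intro pre basis h
    have := ih (pre ++ [c]) (stepB basis c) (inv_step h c)
    simpa using this

lemma B_char (cycle : List (Int × Int)) (c_sssr : List (List (Int × Int))) :
    is_good_cycle_alt cycle c_sssr = true ↔ ¬ SpanSub (c_sssr.map NF) (NF cycle) := by
  have hinv : LoopInv c_sssr (c_sssr.foldl stepB []) := by
    have h0 : LoopInv [] [] := ⟨⟨List.Pairwise.nil, by simp⟩, fun w => Iff.rfl⟩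
    simpa using inv_foldl c_sssr [] [] h0
  obtain ⟨hg, hspan⟩ := hinv
  obtain ⟨x, hx, hfx⟩ := reduceB_span (c_sssr.foldl stepB []) (normSet cycle)
  rw [toFinset_normSet] at hfx
  rw [show is_good_cycle_alt cycle c_sssr
      = !(reduceB (normSet cycle) (c_sssr.foldl stepB [])).isEmpty from rfl]
  rw [Bool.not_eq_eq_eq_not, Bool.not_true, List.isEmpty_eq_false_iff]
  constructor
  · intro hne hspan0
    have h1 : SpanSub (vals (c_sssr.foldl stepB [])) (NF cycle) := (hspan _).mpr hspan0
    have h2 : SpanSub (vals (c_sssr.foldl stepB []))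
        ((reduceB (normSet cycle) (c_sssr.foldl stepB [])).toFinset) := by
      rw [hfx]
      exact spanSub_symmDiff h1 hx
    have h3 : ∀ pb ∈ c_sssr.foldl stepB [],
        pb.1 ∉ (reduceB (normSet cycle) (c_sssr.foldl stepB [])).toFinset := by
      intro pb hpb hc
      exact reduceB_no_pivot _ hg _ pb hpb (List.mem_toFinset.mp hc)
    exact hne ((List.toFinset_eq_empty_iff _).mp (span_no_pivot_eq_empty _ hg h2 h3))
  · intro hns hnil
    apply hns
    have h0 : (∅ : Finset (Int × Int)) = symmDiff (NF cycle) x := by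
      rw [← hfx, hnil]
      rfl
    have hxc : x = NF cycle := (Finset.symmDiff_eq_empty.mp h0.symm).symm
    exact (hspan _).mp (hxc ▸ hx)

-- ===== VERDICT (by name: the statement is the Claim_ definition above) =====
theorem is_good_cycle_spec : Claim_equal_is_good_cycle := by
  intro cycle c_sssr _
  unfold Spec_is_good_cycle
  have hA := A_char cycle c_sssr
  have hB := B_char cycle c_sssr
  by_cases h : SpanSub (c_sssr.map NF) (NF cycle)
  · have h1 : is_good_cycle cycle c_sssr = false := by
      cases hh : is_good_cycle cycle c_sssr
      · rfl
      · exact absurd h (hA.mp hh)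
    have h2 : is_good_cycle_alt cycle c_sssr = false := by
      cases hh : is_good_cycle_alt cycle c_sssr
      · rfl
      · exact absurd h (hB.mp hh)
    rw [h1, h2]
  · rw [hA.mpr h, hB.mpr h]
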